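-- pv_equiv track=rewrite | github.com/thetonyluce/tony-python-core | week_03/labs/08_tuples/08_01_make_tuples.py | tuplify
-- ===== SOURCE A (Python) =====
-- def tuplify(input_list):
--     tuple_list = []
--     input_list.sort()
--     for i in range(0, len(input_list), 2):
--         list_slice = input_list[i:i+2]
--         if len(list_slice) % 2 != 0:
--             list_slice.append(0)
--         tup = tuple(list_slice)
--         tuple_list.append(tup)
--     return tuple_list
-- ===== SOURCE B (Python) =====
-- def tuplify(input_list):
--     input_list.sort()
--     it = iter(input_list)
--     return [(x, next(it, 0)) for x in it]
-- ===== Notes on version B (the rewrite author's own statement) =====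
-- stated objective: idiomatic
-- what changed: Replaced the index-stepping loop with slice/length-parity padding by a single shared-iterator comprehension that pairs consecutive elements directly, padding the odd tail with next(it, 0).
import Mathlib
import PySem

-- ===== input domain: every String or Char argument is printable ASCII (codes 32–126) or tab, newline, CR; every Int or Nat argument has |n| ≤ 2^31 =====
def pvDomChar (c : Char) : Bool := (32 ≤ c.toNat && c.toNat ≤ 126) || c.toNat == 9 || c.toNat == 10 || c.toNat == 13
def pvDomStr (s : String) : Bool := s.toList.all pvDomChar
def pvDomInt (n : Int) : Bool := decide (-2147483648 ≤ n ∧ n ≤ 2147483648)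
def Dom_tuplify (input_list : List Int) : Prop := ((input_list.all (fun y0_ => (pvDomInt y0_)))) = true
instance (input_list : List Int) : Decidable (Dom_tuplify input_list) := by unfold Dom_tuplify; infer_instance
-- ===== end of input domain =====

-- B replaces A's index/slice/parity-padding loop with a shared-iterator pairing (idiomatic);
-- both sort the argument in place in Python (equivalence proved about the RETURN value).

-- ===== PORT A =====
-- loop body of A's 'for i in range(0, len(input_list), 2)'
def stepA (s : List Int) (tuple_list : List (Int × Int)) (i : Int) : List (Int × Int) :=
  let list_slice := PySem.List.slice s (some i) (some (i + 2))
  let list_slice := if list_slice.length % 2 ≠ 0 then list_slice ++ [(0 : Int)] else list_slice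
  -- tuple(list_slice): after padding the slice always has exactly 2 elements; default unreachable
  tuple_list ++ [match list_slice with
                 | a :: b :: _ => (a, b)
                 | _ => ((0 : Int), (0 : Int))]

def tuplify (input_list : List Int) : List (Int × Int) :=
  -- input_list.sort() mutates in place; the sorted list is used for len() and the slices
  (PySem.List.pyRange 0 ((PySem.List.sorted input_list (fun x => x)).length : Int) 2).foldl
    (stepA (PySem.List.sorted input_list (fun x => x))) []

-- ===== PORT B =====
-- 'it = iter(sorted); [(x, next(it, 0)) for x in it]': consume two per step, pad odd tail with 0
def pairUp : List Int → List (Int × Int)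
  | [] => []
  | [x] => [(x, 0)]
  | x :: y :: rest => (x, y) :: pairUp rest

def tuplify_alt (input_list : List Int) : List (Int × Int) :=
  pairUp (PySem.List.sorted input_list (fun x => x))

-- ===== PRECONDITION & SPEC =====
def Spec_tuplify (input_list : List Int) (out : List (Int × Int)) : Prop := out = tuplify_alt input_list
instance (input_list : List Int) (out : List (Int × Int)) : Decidable (Spec_tuplify input_list out) := by unfold Spec_tuplify; infer_instance

-- ===== CLAIM (what is proved, stated in full; the proofs are below) =====
def Claim_equal_tuplify : Prop := ∀ (input_list : List Int), Dom_tuplify input_list → Spec_tuplify input_list (tuplify input_list)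

-- ===== LEMMAS AND PROOFS =====

-- range(0, n, 2) as a mapped List.range
theorem pyRange_step2 (n : Nat) :
    PySem.List.pyRange 0 (n : Int) 2 =
      (List.range ((n + 1) / 2)).map (fun (k : Nat) => (2 * k : Int)) := by
  rw [PySem.List.pyRange_of_pos 0 (n : Int) (by norm_num)]
  have hc : (if (0 : Int) < (n : Int) then (((n : Int) - 0 + 2 - 1) / 2).toNat else 0) = (n + 1) / 2 := by
    split_ifs with h <;> omega
  rw [hc]
  simp only [zero_add]

theorem stepA_zero (x y : Int) (rest : List Int) (a : List (Int × Int)) :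
    stepA (x :: y :: rest) a 0 = a ++ [(x, y)] := by
  simp [stepA, PySem.List.slice_zero_start, PySem.List.slice_to]

theorem stepA_single (x : Int) (a : List (Int × Int)) :
    stepA [x] a 0 = a ++ [(x, 0)] := by
  simp [stepA, PySem.List.slice_zero_start, PySem.List.slice_to]

theorem stepA_shift (x y : Int) (rest : List Int) (a : List (Int × Int)) (k : Nat) :
    stepA (x :: y :: rest) a (2 * ((k : Int) + 1)) = stepA rest a (2 * (k : Int)) := by
  have h1 : (2 * ((k : Int) + 1)) = ((2 * k + 2 : Nat) : Int) := by push_cast; ring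
  have h2 : (2 * (k : Int)) = ((2 * k : Nat) : Int) := by push_cast; ring
  have h3 : ∀ m : Nat, ((m : Int)) + 2 = ((m + 2 : Nat) : Int) := by intro m; push_cast; ring
  simp only [stepA, h1, h2, h3, PySem.List.slice_natCast]
  have hd : (x :: y :: rest).drop (2 * k + 2) = rest.drop (2 * k) := by
    rw [show 2 * k + 2 = (2 * k + 1) + 1 from rfl]
    simp [List.drop_succ_cons]
  rw [hd]
  have e1 : 2 * k + 2 + 2 - (2 * k + 2) = 2 := by omega
  have e2 : 2 * k + 2 - 2 * k = 2 := by omega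
  rw [e1, e2]

theorem foldA_pairUp : ∀ (l : List Int) (acc : List (Int × Int)),
    (List.range ((l.length + 1) / 2)).foldl (fun (a : List (Int × Int)) (k : Nat) => stepA l a (2 * (k : Int))) acc
      = acc ++ pairUp l := by
  intro l
  induction l using pairUp.induct with
  | case1 => intro acc; simp [pairUp]
  | case2 x =>
      intro acc
      norm_num [List.range_one, stepA_single, pairUp]
  | case3 x y rest ih =>
      intro acc
      have hlen : ((x :: y :: rest).length + 1) / 2 = (rest.length + 1) / 2 + 1 := by
        simp [List.length_cons]; omega
      rw [hlen, List.range_succ_eq_map, List.foldl_cons, List.foldl_map]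
      have h0 : (2 * ((0 : Nat) : Int)) = (0 : Int) := by norm_num
      rw [h0, stepA_zero]
      have hfun : (fun (a : List (Int × Int)) (k : Nat) => stepA (x :: y :: rest) a (2 * ((k + 1 : Nat) : Int)))
          = fun (a : List (Int × Int)) (k : Nat) => stepA rest a (2 * (k : Int)) := by
        funext a k
        have : ((k + 1 : Nat) : Int) = (k : Int) + 1 := by push_cast; ring
        rw [this, stepA_shift]
      rw [hfun, ih]
      simp [pairUp]

-- ===== VERDICT (by name: the statement is the Claim_ definition above) =====
theorem tuplify_spec : Claim_equal_tuplify := by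
  intro input_list _
  unfold Spec_tuplify tuplify tuplify_alt
  rw [pyRange_step2, List.foldl_map, foldA_pairUp]
  simp
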